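-- pv_equiv track=rewrite | github.com/kaluginpeter/Algorithms_and_structures_tasks | CodeWars/7kyu/Always_perfect.py | check_root
-- ===== SOURCE A (Python) =====
-- def check_root(strng):
--     parts = strng.split(',')
--     if len(parts) != 4: return "incorrect input"
--     nums = []
--     for p in parts:
--         try: nums.append(int(p))
--         except: return "incorrect input"
--     nums.sort()
--     for i in range(3):
--         if nums[i] + 1 != nums[i + 1]: return "not consecutive"
--     n = nums[0]
--     root = n*n + 3*n + 1
--     square = root * root
--     return f"{square}, {abs(root)}"
-- ===== SOURCE B (Python) =====
-- def _isqrt(n):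
--     # Newton's method integer square root (for n >= 1)
--     x = n
--     y = (x + 1) // 2
--     while y < x:
--         x = y
--         y = (x + n // x) // 2
--     return x
--
--
-- def check_root(strng):
--     parts = strng.split(',')
--     if len(parts) != 4:
--         return "incorrect input"
--     try:
--         nums = [int(p) for p in parts]
--     except ValueError:
--         return "incorrect input"
--     if len(set(nums)) != 4 or max(nums) - min(nums) != 3:
--         return "not consecutive"
--     a, b, c, d = nums
--     square = a * b * c * d + 1
--     return f"{square}, {_isqrt(square)}"
-- ===== Notes on version B (the rewrite author's own statement) =====
-- stated objective: alternative
-- what changed: B drops the sort entirely: consecutiveness is tested as a multiset property (four distinct values via set() and max-min == 3), and the answer is derived as the product of the four inputs plus one followed by a Newton integer square root, instead of evaluating and squaring the closed-form root n*n+3*n+1 on the sorted minimum.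
import Mathlib
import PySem

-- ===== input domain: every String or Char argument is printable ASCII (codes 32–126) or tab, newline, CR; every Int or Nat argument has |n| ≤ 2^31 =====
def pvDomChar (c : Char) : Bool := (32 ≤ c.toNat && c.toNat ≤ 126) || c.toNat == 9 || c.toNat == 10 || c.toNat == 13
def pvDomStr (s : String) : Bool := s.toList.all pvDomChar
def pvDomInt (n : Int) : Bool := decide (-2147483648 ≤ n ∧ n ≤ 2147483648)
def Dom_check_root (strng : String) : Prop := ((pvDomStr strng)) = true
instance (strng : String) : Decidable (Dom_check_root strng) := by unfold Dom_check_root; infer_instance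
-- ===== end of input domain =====

-- B replaces the sort + adjacent-pair check by a multiset test (distinct count via set, max - min == 3)
-- and derives the result as the product of the four inputs plus one followed by a Newton integer
-- square root; alternative decomposition, same asymptotic cost.

-- ===== PORT A =====
-- A's parse loop: nums = []; for p in parts: try nums.append(int(p)) except: return "incorrect input"
def pvParseLoopA : List String → List Int → Option (List Int)
  | [], acc => some acc
  | p :: rest, acc =>
    match PySem.Int.ofStr? p with
    | some n => pvParseLoopA rest (acc ++ [n])
    | none => none

-- A's consecutive-check loop over range(3), with the tail of the function after the loop
def pvConsecLoopA (nums : List Int) : List Int → String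
  | [] =>
    let n := (PySem.List.pyGet? nums 0).getD 0
    let root := n * n + 3 * n + 1
    let square := root * root
    PySem.Int.toStr square ++ ", " ++ PySem.Int.toStr |root|
  | i :: rest =>
    if (PySem.List.pyGet? nums i).getD 0 + 1 ≠ (PySem.List.pyGet? nums (i + 1)).getD 0
    then "not consecutive"
    else pvConsecLoopA nums rest

def check_root (strng : String) : String :=
  let parts := (PySem.Str.split? strng ",").getD []
  if parts.length ≠ 4 then "incorrect input"
  else
    match pvParseLoopA parts [] with
    | none => "incorrect input"
    | some nums0 =>
      let nums := PySem.List.sorted nums0 (fun x => x) false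
      pvConsecLoopA nums (PySem.List.pyRange 0 3 1)

-- ===== PORT B =====
-- B's _isqrt: the Python 'while y < x' Newton loop, ported by hand with a fuel bound;
-- exact wherever the fuel covers the loop's iteration count (proved below for the
-- perfect-square inputs check_root_alt feeds it)
def pvIsqrtGo (n : Int) : Nat → Int → Int → Int
  | 0, x, _ => x
  | f + 1, x, y =>
    if y < x then pvIsqrtGo n f y (PySem.Int.floordiv (y + PySem.Int.floordiv n y) 2)
    else x

def pvIsqrt (n : Int) : Int :=
  pvIsqrtGo n n.toNat n (PySem.Int.floordiv (n + 1) 2)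

def check_root_alt (strng : String) : String :=
  let parts := (PySem.Str.split? strng ",").getD []
  if parts.length ≠ 4 then "incorrect input"
  else
    match parts.mapM PySem.Int.ofStr? with
    | none => "incorrect input"
    | some nums =>
      if PySem.Set.len (PySem.Set.ofList nums) ≠ 4 ∨
         (PySem.List.max? nums (fun v => v)).getD 0 - (PySem.List.min? nums (fun v => v)).getD 0 ≠ 3
      then "not consecutive"
      else
        match nums with
        | [a, b, c, d] =>
          let square := a * b * c * d + 1
          PySem.Int.toStr square ++ ", " ++ PySem.Int.toStr (pvIsqrt square)
        | _ => "incorrect input"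


-- ===== PRECONDITION & SPEC =====
def Spec_check_root (strng : String) (out : String) : Prop := out = check_root_alt strng
instance (strng : String) (out : String) : Decidable (Spec_check_root strng out) := by unfold Spec_check_root; infer_instance

-- ===== CLAIM (what is proved, stated in full; the proofs are below) =====
def Claim_equal_check_root : Prop := ∀ (strng : String), Dom_check_root strng → Spec_check_root strng (check_root strng)

-- ===== LEMMAS AND PROOFS =====
lemma pvParseLoopA_eq (ps : List String) (acc : List Int) :
    pvParseLoopA ps acc = (ps.mapM PySem.Int.ofStr?).map (fun ns => acc ++ ns) := by
  induction ps generalizing acc with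
  | nil => simp [pvParseLoopA]
  | cons p rest ih =>
    simp only [pvParseLoopA, List.mapM_cons]
    cases PySem.Int.ofStr? p with
    | none => rfl
    | some n =>
      simp only [ih]
      cases rest.mapM PySem.Int.ofStr? with
      | none => rfl
      | some ns => simp [Option.map, Option.bind]

lemma pvMapM_length (ps : List String) (ns : List Int)
    (h : ps.mapM PySem.Int.ofStr? = some ns) : ns.length = ps.length := by
  induction ps generalizing ns with
  | nil => simp_all
  | cons p rest ih =>
    simp only [List.mapM_cons] at h
    cases hp : PySem.Int.ofStr? p with
    | none => simp [hp] at h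
    | some n =>
      cases hr : rest.mapM PySem.Int.ofStr? with
      | none => simp [hp, hr] at h
      | some ms =>
        simp [hp, hr] at h
        subst h
        simp [ih ms hr]

lemma pvRootNeZero (a : Int) : a * a + 3 * a + 1 ≠ 0 := by
  intro h
  rcases (show a ≤ -3 ∨ a = -2 ∨ a = -1 ∨ 0 ≤ a by omega) with ha | ha | ha | ha
  · nlinarith
  · subst ha; norm_num at h
  · subst ha; norm_num at h
  · nlinarith

lemma pvNewtonStep (k x : Int) (hk : 1 ≤ k) (hkx : k ≤ x) :
    k ≤ PySem.Int.floordiv (x + PySem.Int.floordiv (k * k) x) 2 ∧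
      (¬ PySem.Int.floordiv (x + PySem.Int.floordiv (k * k) x) 2 < x → x = k) := by
  have hx : (0:Int) < x := by omega
  have hq : 2 * k - x ≤ PySem.Int.floordiv (k * k) x := by
    rw [PySem.Int.le_floordiv_iff_mul_le hx]
    nlinarith [sq_nonneg (x - k)]
  constructor
  · rw [PySem.Int.le_floordiv_iff_mul_le (by norm_num : (0:Int) < 2)]
    omega
  · intro hnot
    rw [not_lt] at hnot
    rw [PySem.Int.le_floordiv_iff_mul_le (by norm_num : (0:Int) < 2)] at hnot
    have hxq : x ≤ PySem.Int.floordiv (k * k) x := by omega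
    rw [PySem.Int.le_floordiv_iff_mul_le hx] at hxq
    nlinarith

lemma pvIsqrtGo_eq (k : Int) (hk : 1 ≤ k) :
    ∀ (f : Nat) (x : Int), k ≤ x → ((x - k).toNat ≤ f) →
      pvIsqrtGo (k * k) f x
        (PySem.Int.floordiv (x + PySem.Int.floordiv (k * k) x) 2) = k := by
  intro f
  induction f with
  | zero =>
    intro x hkx hf
    obtain ⟨hy, hstop⟩ := pvNewtonStep k x hk hkx
    simp only [pvIsqrtGo]
    omega
  | succ f ih =>
    intro x hkx hf
    obtain ⟨hy, hstop⟩ := pvNewtonStep k x hk hkx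
    simp only [pvIsqrtGo]
    split_ifs with hlt
    · exact ih _ hy (by omega)
    · exact hstop hlt

lemma pvIsqrt_sq (k : Int) (hk : 1 ≤ k) : pvIsqrt (k * k) = k := by
  have hkk : k ≤ k * k := by nlinarith
  have h1 : PySem.Int.floordiv (k * k) (k * k) = 1 := by
    rw [PySem.Int.floordiv_eq_iff_of_pos (by nlinarith)]
    constructor <;> nlinarith
  have := pvIsqrtGo_eq k hk (k * k).toNat (k * k) hkk (by omega)
  rw [h1] at this
  simpa [pvIsqrt] using this

lemma pvIsqrt_mul_self (r : Int) (hr : r ≠ 0) : pvIsqrt (r * r) = |r| := by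
  have h := pvIsqrt_sq |r| (Int.one_le_abs hr)
  rwa [abs_mul_abs_self] at h

lemma pvOfListLen (xs : List Int) :
    (PySem.Set.ofList xs).length = xs.length ↔ xs.Nodup := by
  constructor
  · intro h
    have h1 : (PySem.Set.ofList xs).toFinset = xs.toFinset := by
      ext v; simp [List.mem_toFinset, PySem.Set.mem_ofList]
    have h2 := List.toFinset_card_of_nodup (PySem.Set.nodup_ofList xs)
    have h3 := List.card_toFinset xs
    have h4 : xs.dedup.length = xs.length := by rw [← h3, ← h1, h2, h]
    have h5 := (List.dedup_sublist xs).eq_of_length h4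
    rw [← h5]; exact xs.nodup_dedup
  · intro h; rw [PySem.Set.ofList_eq_self_of_nodup xs h]

-- ===== VERDICT (by name: the statement is the Claim_ definition above) =====
theorem check_root_spec : Claim_equal_check_root := by
  intro strng _
  unfold Spec_check_root check_root check_root_alt
  simp only [pvParseLoopA_eq]
  set parts := (PySem.Str.split? strng ",").getD [] with hparts
  by_cases hl : parts.length = 4
  · simp only [hl]
    cases hm : parts.mapM PySem.Int.ofStr? with
    | none => simp
    | some ns =>
      have hlen : ns.length = 4 := by rw [pvMapM_length parts ns hm, hl]
      have hslen : (PySem.List.sorted ns (fun x => x) false).length = 4 := by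
        rw [PySem.List.length_sorted]; exact hlen
      simp only [Option.map_some]
      rcases hL : PySem.List.sorted ns (fun x => x) false with _ | ⟨a, _ | ⟨b, _ | ⟨c, _ | ⟨d, _ | ⟨e, t⟩⟩⟩⟩⟩ <;>
        rw [hL] at hslen <;> simp at hslen
      rcases hN : ns with _ | ⟨w, _ | ⟨x, _ | ⟨y, _ | ⟨z, _ | ⟨e', t'⟩⟩⟩⟩⟩ <;>
        rw [hN] at hlen <;> simp at hlen
      rw [hN] at hL
      have hperm : ([a, b, c, d] : List Int).Perm [w, x, y, z] :=
        hL ▸ PySem.List.sorted_perm [w, x, y, z] (fun v => v) false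
      have hpw := PySem.List.sorted_pairwise (key := fun (v : Int) => v) (xs := [w, x, y, z])
      rw [hL] at hpw
      simp only [List.pairwise_cons, List.mem_cons, List.not_mem_nil] at hpw
      have hab : a ≤ b := hpw.1 b (by simp)
      have hac : a ≤ c := hpw.1 c (by simp)
      have had : a ≤ d := hpw.1 d (by simp)
      have hbc : b ≤ c := hpw.2.1 c (by simp)
      have hbd : b ≤ d := hpw.2.1 d (by simp)
      have hcd : c ≤ d := hpw.2.2.1 d (by simp)
      cases hM : PySem.List.max? [w, x, y, z] (fun v => v) with
      | none => rw [PySem.List.max?_eq_none_iff] at hM; simp at hM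
      | some M =>
      cases hm' : PySem.List.min? [w, x, y, z] (fun v => v) with
      | none => rw [PySem.List.min?_eq_none_iff] at hm'; simp at hm'
      | some m =>
      have hMd : M = d := by
        have h1 : d ≤ M := PySem.List.max?_isMax hM d (hperm.mem_iff.mp (by simp))
        have h2 : M ∈ [a, b, c, d] := hperm.mem_iff.mpr (PySem.List.max?_mem hM)
        simp at h2
        omega
      have hma : m = a := by
        have h1 : m ≤ a := PySem.List.min?_isMin hm' a (hperm.mem_iff.mp (by simp))
        have h2 : m ∈ [a, b, c, d] := hperm.mem_iff.mpr (PySem.List.min?_mem hm')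
        simp at h2
        omega
      have hprod := hperm.prod_eq
      simp only [List.prod_cons, List.prod_nil, mul_one] at hprod
      have hr3 : PySem.List.pyRange 0 3 1 = [0, 1, 2] := by decide
      have t2 : Int.toNat 2 = 2 := rfl
      have t3 : Int.toNat 3 = 3 := rfl
      simp only [List.nil_append, hL, hMd, hma, Option.getD_some, hr3]
      by_cases hcons : b = a + 1 ∧ c = b + 1 ∧ d = c + 1
      · obtain ⟨h1, h2, h3⟩ := hcons
        subst h3; subst h2; subst h1
        have hnodup : ([w, x, y, z] : List Int).Nodup :=
          hperm.nodup_iff.mp (by simp; omega)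
        have hlen4 : (PySem.Set.ofList [w, x, y, z]).length = 4 := by
          have h5 := (pvOfListLen [w, x, y, z]).mpr hnodup
          simpa using h5
        have hsq : w * x * y * z + 1 = (a * a + 3 * a + 1) * (a * a + 3 * a + 1) := by
          linear_combination -hprod
        have hgneg : ¬((PySem.Set.ofList [w, x, y, z]).len ≠ 4 ∨ a + 1 + 1 + 1 - a ≠ 3) := by
          rw [not_or, not_not, not_not]
          exact ⟨by simp [PySem.Set.len, hlen4], by omega⟩
        rw [if_neg hgneg]
        simp only [pvConsecLoopA, PySem.List.pyGet?, PySem.List.pyIdx?]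
        norm_num [t2, t3]
        rw [hsq, pvIsqrt_mul_self _ (pvRootNeZero a)]
      · have hgpos : (PySem.Set.ofList [w, x, y, z]).len ≠ 4 ∨ d - a ≠ 3 := by
          by_cases hdm : d - a = 3
          · left
            intro hlen'
            have hlen4 : (PySem.Set.ofList [w, x, y, z]).length = 4 := by
              simp only [PySem.Set.len] at hlen'; omega
            have hnodup : ([w, x, y, z] : List Int).Nodup := by
              rw [← pvOfListLen]; simpa using hlen4
            have hdist := hperm.nodup_iff.mpr hnodup
            simp at hdist
            exact hcons ⟨by omega, by omega, by omega⟩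
          · right; exact hdm
        rw [if_pos hgpos]
        simp only [pvConsecLoopA, PySem.List.pyGet?, PySem.List.pyIdx?]
        norm_num [t2, t3]
        intro c1 c2 c3
        exact absurd ⟨by omega, by omega, by omega⟩ hcons
  · simp [hl]
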